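-- pv_equiv track=rewrite | github.com/renatawong/bioinformatics-algorithms | find_kmer_clumps.py | find_kmer_clumps
-- ===== SOURCE A (Python) =====
-- def find_kmer_clumps(text, k, L, t):
--
--     # Building a dictionary over all possible k-mers and list of their indices
--     kmer_dict = {}
--
--     for index, _ in enumerate(text):
--
--         pattern = text[index : k+index]
--
--         # create new key and value if key not present in the dictionary
--         if pattern not in kmer_dict:
--             kmer_dict.update({pattern : []})
--
--         # update the value by appending elements to it
--         kmer_dict[pattern].append(index)
--
--
--     kmer_set = set()
--
--     for key, index_list in kmer_dict.items():
--
--         for i in range(len(index_list) - t+1):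
--
--             if (index_list[i+t-1] + k) - index_list[i] < L + 1:
--
--                 kmer_set.add(key)
--
--
--     return kmer_set
-- ===== SOURCE B (Python) =====
-- def find_kmer_clumps(text, k, L, t):
--     # One fused pass: for each index, append it to its pattern's index list and
--     # immediately test the window ending at this occurrence; a per-pattern flag
--     # records whether any window qualified.  A second trivial pass collects the
--     # flagged patterns (in first-occurrence order) into the result set.
--     info = {}
--     for index in range(len(text)):
--         pattern = text[index : index + k]
--         entry = info.setdefault(pattern, [[], False])
--         entry[0].append(index)
--         if not entry[1] and len(entry[0]) >= t and entry[0][-1] + k - entry[0][-t] < L + 1: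
--             entry[1] = True
--     return {p for p, e in info.items() if e[1]}
-- ===== Notes on version B (the rewrite author's own statement) =====
-- stated objective: alternative
-- what changed: B fuses A's dict-building pass and A's separate per-key window-scanning pass into one online pass that tests only the window ending at each newly appended occurrence and records a per-pattern flag, then just collects flagged patterns.
import Mathlib
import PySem

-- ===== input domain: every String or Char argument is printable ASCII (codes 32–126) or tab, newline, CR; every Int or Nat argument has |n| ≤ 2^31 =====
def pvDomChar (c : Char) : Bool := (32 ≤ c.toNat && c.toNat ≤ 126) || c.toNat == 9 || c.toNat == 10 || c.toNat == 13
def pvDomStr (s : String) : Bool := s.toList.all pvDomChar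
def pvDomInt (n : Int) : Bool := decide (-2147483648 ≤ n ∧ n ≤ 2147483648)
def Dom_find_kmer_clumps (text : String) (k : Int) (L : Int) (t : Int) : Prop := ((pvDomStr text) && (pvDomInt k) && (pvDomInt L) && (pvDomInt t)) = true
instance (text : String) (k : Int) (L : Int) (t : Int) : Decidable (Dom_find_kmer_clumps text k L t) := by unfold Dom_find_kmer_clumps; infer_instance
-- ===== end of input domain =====

-- B fuses A's dict-building pass and A's separate per-key window-scanning pass into one
-- online pass with a per-pattern flag (alternative decomposition; same exact result).


-- ===== PORT A =====
-- loop body of A's dict-building pass: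
--   if pattern not in kmer_dict: kmer_dict.update({pattern: []})
--   kmer_dict[pattern].append(index)
-- (the append on the then-present key is ported as read-append-store at the same key)
def aBuildStep (cs : List Char) (k : Int) (d : PySem.Dict String (List Int)) (index : Int) :
    PySem.Dict String (List Int) :=
  let pattern := String.ofList (PySem.List.slice cs (some index) (some (k + index)))
  let d1 := if d.contains pattern then d else d.insert pattern ([] : List Int)
  d1.insert pattern (d1.getD pattern [] ++ [index])

def find_kmer_clumps (text : String) (k : Int) (L : Int) (t : Int) : List String :=
  let cs := text.toList
  let kmer_dict :=
    (PySem.List.enumerate cs 0).foldl (fun d p => aBuildStep cs k d p.1) PySem.Dict.empty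
  kmer_dict.items.foldl (fun s kv =>
    (PySem.List.pyRange 0 ((kv.2.length : Int) - t + 1)).foldl (fun s i =>
      if PySem.List.pyGetD kv.2 (i + t - 1) 0 + k - PySem.List.pyGetD kv.2 i 0 < L + 1 then
        PySem.Set.add s kv.1
      else s) s) (PySem.Set.empty : PySem.Set String)

-- ===== PORT B =====
-- B's per-entry update: append the index, then set the flag if the window ending here qualifies
-- (`entry[0][-1] + k - entry[0][-t] < L + 1`, guarded by the flag and `len(entry[0]) >= t`)
def bStep (k L t : Int) (entry : List Int × Bool) (index : Int) : List Int × Bool :=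
  let lst := entry.1 ++ [index]
  if !entry.2 && decide (t ≤ (lst.length : Int))
      && decide (PySem.List.pyGetD lst (-1) 0 + k - PySem.List.pyGetD lst (-t) 0 < L + 1) then
    (lst, true)
  else (lst, entry.2)

-- `entry = info.setdefault(pattern, [[], False])` + in-place mutation of entry, ported as
-- read (default when absent) + write-back at the same key (insert keeps the key's position)
def bBuildStep (cs : List Char) (k L t : Int) (e : PySem.Dict String (List Int × Bool))
    (index : Int) : PySem.Dict String (List Int × Bool) :=
  let pattern := String.ofList (PySem.List.slice cs (some index) (some (index + k)))
  e.insert pattern (bStep k L t (e.getD pattern ([], false)) index)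

def find_kmer_clumps_alt (text : String) (k : Int) (L : Int) (t : Int) : List String :=
  let cs := text.toList
  let info := (PySem.List.pyRange 0 (cs.length : Int)).foldl (bBuildStep cs k L t) PySem.Dict.empty
  (info.items.filter (fun p => p.2.2)).foldl (fun s p => PySem.Set.add s p.1)
    (PySem.Set.empty : PySem.Set String)

-- ===== PRECONDITION & SPEC =====
-- Pre_ excludes t ≤ 0 on nonempty text, where A raises IndexError in its window scan.
def Pre_find_kmer_clumps (text : String) (k : Int) (L : Int) (t : Int) : Prop :=
  PySem.Str.len text = 0 ∨ 1 ≤ t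
instance (text : String) (k : Int) (L : Int) (t : Int) : Decidable (Pre_find_kmer_clumps text k L t) := by unfold Pre_find_kmer_clumps; infer_instance

def pvWitness_find_kmer_clumps : String × Int × Int × Int := ("GATCAGATC", 3, 8, 2)

def Spec_find_kmer_clumps (text : String) (k : Int) (L : Int) (t : Int) (out : List String) : Prop := out = find_kmer_clumps_alt text k L t
instance (text : String) (k : Int) (L : Int) (t : Int) (out : List String) : Decidable (Spec_find_kmer_clumps text k L t out) := by unfold Spec_find_kmer_clumps; infer_instance

-- ===== CLAIM (what is proved, stated in full; the proofs are below) =====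
def Claim_equal_find_kmer_clumps : Prop := ∀ (text : String) (k : Int) (L : Int) (t : Int), Dom_find_kmer_clumps text k L t → Pre_find_kmer_clumps text k L t → Spec_find_kmer_clumps text k L t (find_kmer_clumps text k L t)

-- ===== LEMMAS AND PROOFS =====

-- the value B stores for a key whose final occurrence list is l
def bVal (k L t : Int) (l : List Int) : List Int × Bool :=
  l.foldl (bStep k L t) ([], false)

theorem bStep_fst (k L t : Int) (st : List Int × Bool) (x : Int) :
    (bStep k L t st x).1 = st.1 ++ [x] := by
  simp only [bStep]
  split <;> rfl

theorem bVal_fst (k L t : Int) (l : List Int) : (bVal k L t l).1 = l := by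
  unfold bVal
  have : ∀ (l : List Int) (st : List Int × Bool), (l.foldl (bStep k L t) st).1 = st.1 ++ l := by
    intro l
    induction l with
    | nil => simp
    | cons x xs ih => intro st; simp [List.foldl_cons, ih, bStep_fst]
  simpa using this l ([], false)

theorem set_add_add (s : PySem.Set String) (x : String) :
    PySem.Set.add (PySem.Set.add s x) x = PySem.Set.add s x := by
  unfold PySem.Set.add
  by_cases hm : x ∈ s
  · simp [hm]
  · simp [hm]

theorem fold_if_add (c : Int → Prop) [DecidablePred c] (key : String) (l : List Int)
    (s : PySem.Set String) :
    l.foldl (fun s i => if c i then PySem.Set.add s key else s) s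
      = if l.any (fun i => decide (c i)) then PySem.Set.add s key else s := by
  induction l generalizing s with
  | nil => simp
  | cons i rest ih =>
      by_cases h : c i
      · simp only [List.foldl_cons, List.any_cons, h, if_pos, decide_true, Bool.true_or]
        rw [ih]
        split
        · exact set_add_add s key
        · rfl
      · simp [h, ih]

theorem keys_of_items_map (d : PySem.Dict String (List Int))
    (e : PySem.Dict String (List Int × Bool)) (k L t : Int)
    (hit : e.items = d.items.map (fun q => (q.1, bVal k L t q.2))) :
    e.keys = d.keys := by
  simp [PySem.Dict.keys, hit, List.map_map, Function.comp]

-- one build step preserves the dict correspondence (B stores (list, flag) where A stores list)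
theorem build_step (cs : List Char) (k L t : Int)
    (d : PySem.Dict String (List Int)) (e : PySem.Dict String (List Int × Bool)) (i : Int)
    (hnd : d.keys.Nodup)
    (hit : e.items = d.items.map (fun q => (q.1, bVal k L t q.2))) :
    (aBuildStep cs k d i).keys.Nodup ∧
      (bBuildStep cs k L t e i).items
        = (aBuildStep cs k d i).items.map (fun q => (q.1, bVal k L t q.2)) := by
  have hkeys : e.keys = d.keys := keys_of_items_map d e k L t hit
  have hend : e.keys.Nodup := hkeys ▸ hnd
  simp only [aBuildStep, bBuildStep]
  rw [show i + k = k + i from by ring]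
  set p := String.ofList (PySem.List.slice cs (some i) (some (k + i))) with hp
  have hcont : e.contains p = d.contains p := by
    rw [PySem.Dict.contains_eq_decide_mem_keys, PySem.Dict.contains_eq_decide_mem_keys, hkeys]
  by_cases hc : d.contains p = true
  · -- key already present
    have hec : e.contains p = true := by rw [hcont, hc]
    constructor
    · simp only [hc, if_true]
      exact PySem.Dict.nodup_keys_insert d p _ hnd
    · simp only [hc, if_true]
      rw [PySem.Dict.items_insert_of_contains e (bStep k L t (e.getD p ([], false)) i) hec,
          PySem.Dict.items_insert_of_contains d (d.getD p [] ++ [i]) hc, hit,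
          List.map_map, List.map_map]
      refine List.map_congr_left ?_
      intro q hq
      by_cases hqp : q.1 = p
      · have hdg : d.getD q.1 [] = q.2 := PySem.Dict.getD_of_mem_items d hq hnd []
        have heg : e.getD p ([], false) = bVal k L t q.2 := by
          apply PySem.Dict.getD_of_mem_items e _ hend
          rw [hit]
          exact hqp ▸ List.mem_map_of_mem hq
        simp only [Function.comp, hqp, beq_self_eq_true, if_true, heg]
        have : d.getD p [] = q.2 := hqp ▸ hdg
        rw [this]
        show (p, bStep k L t (bVal k L t q.2) i) = (p, bVal k L t (q.2 ++ [i]))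
        unfold bVal
        rw [List.foldl_append]
        rfl
      · have : (q.1 == p) = false := beq_eq_false_iff_ne.mpr hqp
        simp [Function.comp, this]
  · -- fresh key: both sides append their new entry
    have hec : e.contains p = false := by rw [hcont]; exact eq_false_of_ne_true hc
    have hc' : d.contains p = false := eq_false_of_ne_true hc
    constructor
    · simp only [hc', Bool.false_eq_true, if_false]
      rw [PySem.Dict.insert_insert_self]
      exact PySem.Dict.nodup_keys_insert d p _ hnd
    · simp only [hc', Bool.false_eq_true, if_false]
      rw [PySem.Dict.insert_insert_self, PySem.Dict.getD_insert_self]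
      rw [PySem.Dict.items_insert_of_not_contains e _ hec,
          PySem.Dict.items_insert_of_not_contains d _ hc', hit, List.map_append,
          PySem.Dict.getD_of_not_contains e ([], false) hec]
      rfl

theorem build_inv (cs : List Char) (k L t : Int) (ixs : List Int)
    (d : PySem.Dict String (List Int)) (e : PySem.Dict String (List Int × Bool))
    (hnd : d.keys.Nodup)
    (hit : e.items = d.items.map (fun q => (q.1, bVal k L t q.2))) :
    (ixs.foldl (aBuildStep cs k) d).keys.Nodup ∧
      (ixs.foldl (bBuildStep cs k L t) e).items
        = (ixs.foldl (aBuildStep cs k) d).items.map (fun q => (q.1, bVal k L t q.2)) := by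
  induction ixs generalizing d e with
  | nil => exact ⟨hnd, hit⟩
  | cons i rest ih =>
      obtain ⟨h1, h2⟩ := build_step cs k L t d e i hnd hit
      exact ih _ _ h1 h2

theorem bStep_snd (k L t : Int) (st : List Int × Bool) (x : Int) :
    (bStep k L t st x).2 = (st.2 || (decide (t ≤ ((st.1 ++ [x]).length : Int)) &&
      decide (PySem.List.pyGetD (st.1 ++ [x]) (-1) 0 + k
        - PySem.List.pyGetD (st.1 ++ [x]) (-t) 0 < L + 1))) := by
  rcases st with ⟨l0, b⟩
  cases b <;> simp [bStep]
  split
  · rename_i h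
    simp [h.1, h.2]
  · rename_i h
    rcases Decidable.not_and_iff_or_not.mp h with h | h <;> simp [h]

theorem bVal_append (k L t : Int) (l : List Int) (x : Int) :
    bVal k L t (l ++ [x]) = bStep k L t (bVal k L t l) x := by
  unfold bVal; rw [List.foldl_append]; rfl

theorem pyGetD_append_lt (l : List Int) (x : Int) (j : Int) (h0 : 0 ≤ j) (h : j < (l.length : Int)) :
    PySem.List.pyGetD (l ++ [x]) j 0 = PySem.List.pyGetD l j 0 := by
  rw [PySem.List.pyGetD_eq_getElem (l ++ [x]) 0 h0 (by simp; omega),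
      PySem.List.pyGetD_eq_getElem l 0 h0 h]
  exact List.getElem_append_left (by omega)

-- the core: B's online flag over the final occurrence list equals A's window scan over it
theorem flag_eq_exists (k L t : Int) (ht : 1 ≤ t) (l : List Int) :
    (bVal k L t l).2
      = (PySem.List.pyRange 0 ((l.length : Int) - t + 1)).any (fun i =>
          decide (PySem.List.pyGetD l (i + t - 1) 0 + k - PySem.List.pyGetD l i 0 < L + 1)) := by
  induction l using List.reverseRecOn with
  | nil =>
      rw [PySem.List.pyRange_one_eq_nil (by simp; omega)]
      rfl
  | append_singleton l' x ih =>
      rw [bVal_append, bStep_snd, bVal_fst, ih]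
      have hlen : (((l' ++ [x]).length : Nat) : Int) = (l'.length : Int) + 1 := by simp
      by_cases hle : t ≤ (l'.length : Int) + 1
      · -- the new window ending at x is in range
        have hsplit : ((l' ++ [x]).length : Int) - t + 1 = ((l'.length : Int) - t + 1) + 1 := by
          rw [hlen]; ring
        rw [hsplit,
            PySem.List.pyRange_one_succ_right (a := 0) (b := (l'.length : Int) - t + 1) (by omega),
            List.any_append]
        have hpre : (PySem.List.pyRange 0 ((l'.length : Int) - t + 1)).any (fun i =>
              decide (PySem.List.pyGetD (l' ++ [x]) (i + t - 1) 0 + k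
                - PySem.List.pyGetD (l' ++ [x]) i 0 < L + 1))
            = (PySem.List.pyRange 0 ((l'.length : Int) - t + 1)).any (fun i =>
              decide (PySem.List.pyGetD l' (i + t - 1) 0 + k
                - PySem.List.pyGetD l' i 0 < L + 1)) := by
          rw [Bool.eq_iff_iff, List.any_eq_true, List.any_eq_true]
          constructor
          · rintro ⟨i, hi, hdec⟩
            refine ⟨i, hi, ?_⟩
            rw [PySem.List.mem_pyRange_one] at hi
            rwa [pyGetD_append_lt l' x (i + t - 1) (by omega) (by omega),
                pyGetD_append_lt l' x i (by omega) (by omega)] at hdec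
          · rintro ⟨i, hi, hdec⟩
            refine ⟨i, hi, ?_⟩
            rw [PySem.List.mem_pyRange_one] at hi
            rwa [pyGetD_append_lt l' x (i + t - 1) (by omega) (by omega),
                pyGetD_append_lt l' x i (by omega) (by omega)]
        rw [hpre]
        have hlast : decide (PySem.List.pyGetD (l' ++ [x]) (-1) 0 + k
              - PySem.List.pyGetD (l' ++ [x]) (-t) 0 < L + 1)
            = decide (PySem.List.pyGetD (l' ++ [x]) (((l'.length : Int) - t + 1) + t - 1) 0 + k
              - PySem.List.pyGetD (l' ++ [x]) ((l'.length : Int) - t + 1) 0 < L + 1) := by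
          have h1 : PySem.List.pyGetD (l' ++ [x]) (-1) 0 = x :=
            PySem.List.pyGetD_neg_one_append_singleton l' x 0
          have h2 : PySem.List.pyGetD (l' ++ [x]) (((l'.length : Int) - t + 1) + t - 1) 0 = x := by
            rw [show ((l'.length : Int) - t + 1) + t - 1 = ((l'.length : Nat) : Int) from by ring]
            rw [PySem.List.pyGetD_eq_getElem (l' ++ [x]) 0 (by omega) (by simp)]
            exact List.getElem_concat_length (by simp) _
          have h3 : PySem.List.pyGetD (l' ++ [x]) (-t) 0
              = PySem.List.pyGetD (l' ++ [x]) ((l'.length : Int) - t + 1) 0 := by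
            rw [PySem.List.pyGetD_eq_getElem (l' ++ [x]) (i := (l'.length : Int) - t + 1) 0
                  (by omega)
                  (by simp only [List.length_append, List.length_cons, List.length_nil]
                      push_cast; omega)]
            rw [show (-t : Int) = -((t.toNat : Nat) : Int) from by omega,
                PySem.List.pyGetD_neg_natCast (l' ++ [x]) t.toNat 0 (by omega)
                  (by simp only [List.length_append, List.length_cons, List.length_nil]; omega)]
            congr 1
            simp only [List.length_append, List.length_cons, List.length_nil]
            omega
          rw [h1, h2, h3]
        rw [hlast]
        have hdt : decide (t ≤ ((l' ++ [x]).length : Int)) = true := by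
          rw [hlen]; simp [hle]
        rw [hdt]
        simp [Bool.or_comm]
      · -- too few occurrences yet: the flag stays put and both ranges are empty
        have hr : ((l' ++ [x]).length : Int) - t + 1 ≤ 0 := by rw [hlen]; omega
        rw [PySem.List.pyRange_one_eq_nil hr, PySem.List.pyRange_one_eq_nil (by omega)]
        have hdt : decide (t ≤ ((l' ++ [x]).length : Int)) = false := by
          rw [hlen]; simp; omega
        rw [hdt]
        simp

theorem a_eq_b (text : String) (k L t : Int)
    (hpre : (text.toList.length : Int) = 0 ∨ 1 ≤ t) :
    find_kmer_clumps text k L t = find_kmer_clumps_alt text k L t := by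
  by_cases ht : 1 ≤ t
  · simp only [find_kmer_clumps, find_kmer_clumps_alt]
    have hA : (PySem.List.enumerate text.toList 0).foldl
          (fun d p => aBuildStep text.toList k d p.1) PySem.Dict.empty
        = (PySem.List.pyRange 0 (text.toList.length : Int)).foldl
            (aBuildStep text.toList k) PySem.Dict.empty := by
      rw [← List.foldl_map (f := fun (p : Int × Char) => p.1) (g := aBuildStep text.toList k),
          PySem.List.map_fst_enumerate, zero_add]
    rw [hA]
    obtain ⟨hnd, hitems⟩ := build_inv text.toList k L t
      (PySem.List.pyRange 0 (text.toList.length : Int)) PySem.Dict.empty PySem.Dict.empty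
      PySem.Dict.nodup_keys_empty rfl
    rw [hitems, List.filter_map, List.foldl_map, List.foldl_filter]
    congr 1
    funext s q
    rw [fold_if_add (fun i =>
        PySem.List.pyGetD q.2 (i + t - 1) 0 + k - PySem.List.pyGetD q.2 i 0 < L + 1) q.1]
    simp only [Function.comp]
    rw [← flag_eq_exists k L t ht q.2]
  · have htext : text.toList = [] := by
      rcases hpre with h | h
      · exact List.length_eq_zero_iff.mp (by exact_mod_cast h)
      · omega
    simp only [find_kmer_clumps, find_kmer_clumps_alt, htext]
    rfl

-- ===== VERDICT (by name: the statement is the Claim_ definition above) =====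
theorem find_kmer_clumps_spec : Claim_equal_find_kmer_clumps := by
  intro text k L t _ hpre
  unfold Spec_find_kmer_clumps
  exact a_eq_b text k L t hpre
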